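-- pv_equiv track=rewrite | github.com/0h328/TIL | 0819/swsilver95/1219_길찾기/s1.py | dfs
-- ===== SOURCE A (Python) =====
-- def dfs(route1, route2):
--     stk = []
--     visited = [False for _ in range(100)]
--     p = route1[0]
--     stk.append(p)
--     visited[0] = True
--     visited[p] = True
--
--     while True:
--         if visited[99]:
--             return 1
--
--         if route1[p] != -1 and (not visited[route1[p]]):
--             stk.append(p)
--             p = route1[p]
--             visited[p] = True
--         elif route2[p] != -1 and (not visited[route2[p]]):
--             stk.append(p)
--             p = route2[p]
--             visited[p] = True
--         else:
--             if stk: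
--                 p = stk.pop()
--             else:
--                 return 0
-- ===== SOURCE B (Python) =====
-- def dfs(route1, route2):
--     visited = [False] * 100
--     start = route1[0]
--     visited[0] = True
--     visited[start] = True
--
--     def go(p):
--         if visited[99]:
--             return True
--         for route in (route1, route2):
--             s = route[p]
--             if s != -1 and not visited[s]:
--                 visited[s] = True
--                 if go(s):
--                     return True
--         return False
--
--     return 1 if go(start) else 0
-- ===== Notes on version B (the rewrite author's own statement) =====
-- stated objective: idiomatic
-- what changed: The explicit stack with push/pop backtracking and the elif chain is replaced by a recursive DFS helper (call stack instead of the list stack) that loops over the two route arrays per node; the visited[0]/visited[start] pre-marking and the visited[99] success test are kept.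
-- outside the precondition, e.g. on dfs([0], [0]): A returns 0, B returns 0; on dfs([], []): A raises IndexError, B raises IndexError; on dfs([2, 0, 1], [1, -1, -1]): A returns 0, B returns 0
import Mathlib
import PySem

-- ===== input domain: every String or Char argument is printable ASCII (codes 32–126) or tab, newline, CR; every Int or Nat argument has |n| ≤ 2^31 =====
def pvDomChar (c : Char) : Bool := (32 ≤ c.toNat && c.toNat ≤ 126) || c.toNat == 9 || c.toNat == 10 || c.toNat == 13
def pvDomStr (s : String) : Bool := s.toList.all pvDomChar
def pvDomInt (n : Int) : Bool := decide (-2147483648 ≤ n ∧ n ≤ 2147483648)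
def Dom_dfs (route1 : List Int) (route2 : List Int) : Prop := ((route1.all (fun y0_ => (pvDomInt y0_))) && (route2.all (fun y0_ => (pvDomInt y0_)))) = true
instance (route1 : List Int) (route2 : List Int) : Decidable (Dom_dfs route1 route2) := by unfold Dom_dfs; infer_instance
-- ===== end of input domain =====

-- B replaces A's explicit stack with push/pop backtracking by a recursive DFS helper
-- (call stack instead of the list stack), keeping the visited[0]/visited[start]
-- pre-marking and the visited[99] success test.

-- shared Python-exact accessors (visited[i] read/write, route[i] read); totalised with a
-- default outside the index range, which Pre_dfs excludes
def vget (v : List Bool) (i : Int) : Bool := PySem.List.pyGetD v i false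
def vset (v : List Bool) (i : Int) : List Bool := PySem.List.pySetD v i true
def aget (r : List Int) (i : Int) : Int := PySem.List.pyGetD r i 0

-- ===== PORT A =====
-- the while-True loop; fuel (300 is enough, proved below) only makes it total
def dfsLoop (route1 : List Int) (route2 : List Int) : Nat → Int → List Int → List Bool → Int
  | 0, _, _, _ => 0
  | fuel + 1, p, stk, visited =>
    if vget visited 99 then 1
    else
      let c1 := aget route1 p
      if c1 ≠ -1 ∧ vget visited c1 = false then
        dfsLoop route1 route2 fuel c1 (p :: stk) (vset visited c1)
      else
        let c2 := aget route2 p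
        if c2 ≠ -1 ∧ vget visited c2 = false then
          dfsLoop route1 route2 fuel c2 (p :: stk) (vset visited c2)
        else
          match stk with
          | q :: rest => dfsLoop route1 route2 fuel q rest visited
          | [] => 0

def dfs (route1 : List Int) (route2 : List Int) : Int :=
  let p := aget route1 0
  let visited := vset (vset (List.replicate 100 false) 0) p
  dfsLoop route1 route2 300 p [p] visited

-- ===== PORT B =====
-- the recursive go helper; fuel (100 is enough, proved below) only makes it total;
-- the for-loop over (route1, route2) becomes the sequential s1/s2 chain
def dfsGo (route1 : List Int) (route2 : List Int) : Nat → Int → List Bool → Bool × List Bool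
  | 0, _, v => (false, v)
  | fuel + 1, p, v =>
    if vget v 99 then (true, v)
    else
      let s1 := aget route1 p
      let r := if s1 ≠ -1 ∧ vget v s1 = false then dfsGo route1 route2 fuel s1 (vset v s1)
               else (false, v)
      if r.1 then (true, r.2)
      else
        let s2 := aget route2 p
        if s2 ≠ -1 ∧ vget r.2 s2 = false then dfsGo route1 route2 fuel s2 (vset r.2 s2)
        else (false, r.2)

def dfs_alt (route1 : List Int) (route2 : List Int) : Int :=
  let start := aget route1 0
  let visited := vset (vset (List.replicate 100 false) 0) start
  if (dfsGo route1 route2 100 start visited).1 then 1 else 0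

-- ===== PRECONDITION & SPEC =====
-- Pre_dfs covers (a) inputs whose start entry route1[0] is -1 or 99, where A answers 1
-- immediately from the visited array without reading anything else, and (b) the task's
-- natural input shape (100 adjacency entries per route, each -1 or a node id 0..99);
-- outside these A can raise IndexError on an out-of-range read reached by the walk
-- (which no closed-form condition captures), so such inputs are excluded even though
-- A returns on some of them.
def Pre_dfs (route1 : List Int) (route2 : List Int) : Prop :=
  (PySem.List.pyGet? route1 0 = some (-1) ∨ PySem.List.pyGet? route1 0 = some 99)
  ∨ (route1.length = 100 ∧ route2.length = 100 ∧
     (∀ x ∈ route1, -1 ≤ x ∧ x ≤ 99) ∧ (∀ x ∈ route2, -1 ≤ x ∧ x ≤ 99))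
instance (route1 : List Int) (route2 : List Int) : Decidable (Pre_dfs route1 route2) := by unfold Pre_dfs; infer_instance
def pvWitness_dfs : List Int × List Int := (List.replicate 100 (1 : Int), List.replicate 100 (-1 : Int))

def Spec_dfs (route1 : List Int) (route2 : List Int) (out : Int) : Prop := out = dfs_alt route1 route2
instance (route1 : List Int) (route2 : List Int) (out : Int) : Decidable (Spec_dfs route1 route2 out) := by unfold Spec_dfs; infer_instance

-- ===== CLAIM (what is proved, stated in full; the proofs are below) =====
def Claim_equal_dfs : Prop := ∀ (route1 : List Int) (route2 : List Int), Dom_dfs route1 route2 → Pre_dfs route1 route2 → Spec_dfs route1 route2 (dfs route1 route2)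

-- ===== LEMMAS AND PROOFS =====

-- proof-side helpers: the children phase of go, and unwinding A's stack
def explore (route1 route2 : List Int) (G : Nat) (p : Int) (v : List Bool) : Bool × List Bool :=
  let s1 := aget route1 p
  let r := if s1 ≠ -1 ∧ vget v s1 = false then dfsGo route1 route2 G s1 (vset v s1)
           else (false, v)
  if r.1 then (true, r.2)
  else
    let s2 := aget route2 p
    if s2 ≠ -1 ∧ vget r.2 s2 = false then dfsGo route1 route2 G s2 (vset r.2 s2)
    else (false, r.2)

def unwind (route1 route2 : List Int) (G : Nat) : Bool × List Bool → List Int → Int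
  | (true, _), _ => 1
  | (false, _), [] => 0
  | (false, v), q :: rest => unwind route1 route2 G (explore route1 route2 G q v) rest

def subv (v w : List Bool) : Prop := ∀ n : Nat, v.getD n false = true → w.getD n false = true

def WFroute (r : List Int) : Prop := r.length = 100 ∧ ∀ x ∈ r, -1 ≤ x ∧ x ≤ 99

def okp (p : Int) : Prop := 0 ≤ p ∧ p ≤ 99

lemma vget_eq (v : List Bool) (i : Int) (h0 : 0 ≤ i) (h1 : i < (v.length : Int)) :
    vget v i = v.getD i.toNat false := by
  rw [vget, PySem.List.pyGetD_eq_getElem v false h0 h1, List.getD_eq_getElem]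

lemma vset_eq (v : List Bool) (i : Int) (h0 : 0 ≤ i) : vset v i = v.set i.toNat true :=
  PySem.List.pySetD_of_nonneg v true h0

lemma length_vset (v : List Bool) (i : Int) : (vset v i).length = v.length :=
  PySem.List.length_pySetD v i true

lemma getD_set_self (v : List Bool) (n : Nat) (h : n < v.length) :
    (v.set n true).getD n false = true := by
  simp [List.getD, List.getElem?_set_self h]

lemma getD_set_ne (v : List Bool) (n m : Nat) (h : n ≠ m) :
    (v.set n true).getD m false = v.getD m false := by
  simp [List.getD, List.getElem?_set_ne h]

lemma count_set_le (v : List Bool) (n : Nat) : (v.set n true).count false ≤ v.count false := by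
  by_cases h : n < v.length
  · rw [List.count_set h]
    split_ifs with h1 h2 <;> simp_all <;> omega
  · rw [List.set_eq_of_length_le (by omega)]

lemma count_set_lt (v : List Bool) (n : Nat) (h : n < v.length) (hf : v.getD n false = false) :
    (v.set n true).count false + 1 = v.count false := by
  have hg : v[n] = false := by rw [← List.getD_eq_getElem v false h]; exact hf
  rw [List.count_set h]
  have hpos : 0 < v.count false := List.count_pos_iff.mpr (hg ▸ List.getElem_mem h)
  simp [hg]
  omega

lemma count_pos (v : List Bool) (n : Nat) (h : n < v.length) (hf : v.getD n false = false) :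
    0 < v.count false := by
  have hg : v[n] = false := by rw [← List.getD_eq_getElem v false h]; exact hf
  exact List.count_pos_iff.mpr (hg ▸ List.getElem_mem h)

lemma subv_set (v : List Bool) (n : Nat) : subv v (v.set n true) := by
  intro m hm
  by_cases e : n = m
  · subst e
    by_cases h : n < v.length
    · exact getD_set_self v n h
    · rw [List.set_eq_of_length_le (by omega)]; exact hm
  · rw [getD_set_ne v n m e]; exact hm

lemma subv_trans (u v w : List Bool) (h1 : subv u v) (h2 : subv v w) : subv u w :=
  fun n hn => h2 n (h1 n hn)

lemma okp_aget (r : List Int) (p : Int) (hr : WFroute r) (hp : okp p) (hne : aget r p ≠ -1) :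
    okp (aget r p) := by
  obtain ⟨hlen, hb⟩ := hr
  obtain ⟨hp0, hp1⟩ := hp
  have hmem : aget r p ∈ r := PySem.List.pyGetD_mem r 0 (by constructor <;> (rw [hlen]; push_cast; omega))
  have := hb _ hmem
  exact ⟨by omega, this.2⟩

lemma vget_unmarked (v : List Bool) (s : Int) (hlen : v.length = 100) (hs : okp s)
    (h : vget v s = false) : v.getD s.toNat false = false := by
  obtain ⟨h0s, h1s⟩ := hs
  rw [← vget_eq v s h0s (by rw [hlen]; push_cast; omega)]
  exact h

lemma vget_marked (v : List Bool) (s : Int) (hlen : v.length = 100) (hs : okp s)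
    (h : ¬ vget v s = false) : v.getD s.toNat false = true := by
  obtain ⟨h0s, h1s⟩ := hs
  rw [← vget_eq v s h0s (by rw [hlen]; push_cast; omega)]
  cases hvg : vget v s
  · exact absurd hvg h
  · rfl

-- getD/count/length facts about a freshly marked cell, stated in vset form
lemma len_mark (v : List Bool) (s : Int) (hlen : v.length = 100) : (vset v s).length = 100 := by
  rw [length_vset]; exact hlen

lemma markD_self (v : List Bool) (s : Int) (hlen : v.length = 100) (hs : okp s) :
    (vset v s).getD s.toNat false = true := by
  rw [vset_eq v s hs.1]
  exact getD_set_self v s.toNat (by obtain ⟨a, b⟩ := hs; omega)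

lemma markD_99 (v : List Bool) (s : Int) (hlen : v.length = 100) (hs : okp s) (hne : s ≠ 99) :
    (vset v s).getD 99 false = v.getD 99 false := by
  rw [vset_eq v s hs.1]
  exact getD_set_ne v s.toNat 99 (by obtain ⟨a, b⟩ := hs; omega)

lemma subv_mark (v : List Bool) (s : Int) (hs : 0 ≤ s) : subv v (vset v s) := by
  rw [vset_eq v s hs]
  exact subv_set v s.toNat

lemma cnt_mark (v : List Bool) (s : Int) (hlen : v.length = 100) (hs : okp s)
    (hunm : vget v s = false) : (vset v s).count false + 1 = v.count false := by
  rw [vset_eq v s hs.1]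
  exact count_set_lt v s.toNat (by obtain ⟨a, b⟩ := hs; omega) (vget_unmarked v s hlen hs hunm)

lemma cnt_mark_le (v : List Bool) (s : Int) (hs : 0 ≤ s) :
    (vset v s).count false ≤ v.count false := by
  rw [vset_eq v s hs]
  exact count_set_le v s.toNat

lemma cnt_pos (v : List Bool) (s : Int) (hlen : v.length = 100) (hs : okp s)
    (hunm : vget v s = false) : 0 < v.count false :=
  count_pos v s.toNat (by obtain ⟨a, b⟩ := hs; omega) (vget_unmarked v s hlen hs hunm)

lemma vget_mark_99 (v : List Bool) (hlen : v.length = 100) : vget (vset v 99) 99 = true := by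
  rw [vget_eq _ 99 (by omega) (by rw [length_vset, hlen]; norm_num),
    vset_eq v 99 (by omega)]
  exact getD_set_self v 99 (by omega)

-- one-step unfoldings of the go helper
lemma go_found (r1 r2 : List Int) (F : Nat) (p : Int) (v : List Bool)
    (h : vget v 99 = true) : dfsGo r1 r2 (F + 1) p v = (true, v) := by
  simp [dfsGo, h]

lemma go_unfound (r1 r2 : List Int) (F : Nat) (p : Int) (v : List Bool)
    (h : vget v 99 = false) : dfsGo r1 r2 (F + 1) p v = explore r1 r2 F p v := by
  simp [dfsGo, explore, h]

lemma explore_child1 (r1 r2 : List Int) (G : Nat) (p : Int) (v : List Bool)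
    (hC1 : aget r1 p ≠ -1 ∧ vget v (aget r1 p) = false) :
    explore r1 r2 G p v =
      (if (dfsGo r1 r2 G (aget r1 p) (vset v (aget r1 p))).1 then
         (true, (dfsGo r1 r2 G (aget r1 p) (vset v (aget r1 p))).2)
       else
         (if aget r2 p ≠ -1 ∧ vget (dfsGo r1 r2 G (aget r1 p) (vset v (aget r1 p))).2 (aget r2 p) = false then
            dfsGo r1 r2 G (aget r2 p) (vset (dfsGo r1 r2 G (aget r1 p) (vset v (aget r1 p))).2 (aget r2 p))
          else (false, (dfsGo r1 r2 G (aget r1 p) (vset v (aget r1 p))).2))) := by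
  simp only [explore, if_pos hC1]

lemma explore_skip1 (r1 r2 : List Int) (G : Nat) (p : Int) (v : List Bool)
    (hC1 : ¬(aget r1 p ≠ -1 ∧ vget v (aget r1 p) = false)) :
    explore r1 r2 G p v =
      (if aget r2 p ≠ -1 ∧ vget v (aget r2 p) = false then
         dfsGo r1 r2 G (aget r2 p) (vset v (aget r2 p))
       else (false, v)) := by
  simp only [explore, if_neg hC1]
  simp

def ResProp (r1 r2 : List Int) (p : Int) (v : List Bool) (res : Bool × List Bool) : Prop :=
  res.2.length = 100 ∧ subv v res.2 ∧ res.2.count false ≤ v.count false ∧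
  (res.1 = false →
    (res.2.getD 99 false = v.getD 99 false ∧
     (aget r1 p = -1 ∨ res.2.getD (aget r1 p).toNat false = true) ∧
     (aget r2 p = -1 ∨ res.2.getD (aget r2 p).toNat false = true)))

-- a freshly marked child whose go returned false cannot be node 99 (go would have found 99)
lemma child_ne_99 (r1 r2 : List Int) (G : Nat) (s : Int) (w : List Bool)
    (hlen : w.length = 100) (hGpos : 0 < G)
    (hf : (dfsGo r1 r2 G s (vset w s)).1 = false) : s ≠ 99 := by
  intro he
  subst he
  obtain ⟨G', rfl⟩ : ∃ G', G = G' + 1 := ⟨G - 1, by omega⟩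
  rw [go_found r1 r2 G' 99 (vset w 99) (vget_mark_99 w hlen)] at hf
  cases hf

lemma explore_props_aux (r1 r2 : List Int) (hr1 : WFroute r1) (hr2 : WFroute r2) (G : Nat)
    (hgo : ∀ (q : Int) (w : List Bool), w.length = 100 → okp q →
      w.count false < G → ResProp r1 r2 q w (dfsGo r1 r2 G q w))
    (p : Int) (v : List Bool) (hlen : v.length = 100) (hp : okp p) (hG : v.count false ≤ G) :
    ResProp r1 r2 p v (explore r1 r2 G p v) := by
  by_cases hC1 : aget r1 p ≠ -1 ∧ vget v (aget r1 p) = false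
  · -- first child explored
    have hs1ok : okp (aget r1 p) := okp_aget r1 p hr1 hp hC1.1
    have hcnt1 : (vset v (aget r1 p)).count false + 1 = v.count false :=
      cnt_mark v _ hlen hs1ok hC1.2
    have hGpos : 0 < G := by
      have := cnt_pos v _ hlen hs1ok hC1.2
      omega
    obtain ⟨g1, g2, g4, g5⟩ :=
      hgo (aget r1 p) (vset v (aget r1 p)) (len_mark v _ hlen) hs1ok (by omega)
    have gsub : subv v (dfsGo r1 r2 G (aget r1 p) (vset v (aget r1 p))).2 :=
      subv_trans _ _ _ (subv_mark v _ hs1ok.1) g2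
    have gmark : (dfsGo r1 r2 G (aget r1 p) (vset v (aget r1 p))).2.getD (aget r1 p).toNat false = true :=
      g2 _ (markD_self v _ hlen hs1ok)
    have gcnt : (dfsGo r1 r2 G (aget r1 p) (vset v (aget r1 p))).2.count false ≤ v.count false := by
      have := cnt_mark_le v (aget r1 p) hs1ok.1
      omega
    rw [explore_child1 r1 r2 G p v hC1]
    by_cases hw1 : (dfsGo r1 r2 G (aget r1 p) (vset v (aget r1 p))).1 = true
    · rw [if_pos hw1]
      exact ⟨g1, gsub, gcnt, by intro h; cases h⟩
    · have hw1' : (dfsGo r1 r2 G (aget r1 p) (vset v (aget r1 p))).1 = false := by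
        cases hx : (dfsGo r1 r2 G (aget r1 p) (vset v (aget r1 p))).1
        · rfl
        · exact absurd hx hw1
      rw [if_neg hw1]
      have hs1ne : aget r1 p ≠ 99 := child_ne_99 r1 r2 G (aget r1 p) v hlen hGpos hw1'
      obtain ⟨g99, _, _⟩ := g5 hw1'
      have g99v : (dfsGo r1 r2 G (aget r1 p) (vset v (aget r1 p))).2.getD 99 false = v.getD 99 false := by
        rw [g99, markD_99 v _ hlen hs1ok hs1ne]
      by_cases hC2 : aget r2 p ≠ -1 ∧ vget (dfsGo r1 r2 G (aget r1 p) (vset v (aget r1 p))).2 (aget r2 p) = false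
      · rw [if_pos hC2]
        have hs2ok : okp (aget r2 p) := okp_aget r2 p hr2 hp hC2.1
        have hcnt2 : (vset (dfsGo r1 r2 G (aget r1 p) (vset v (aget r1 p))).2 (aget r2 p)).count false + 1
            = (dfsGo r1 r2 G (aget r1 p) (vset v (aget r1 p))).2.count false :=
          cnt_mark _ _ g1 hs2ok hC2.2
        obtain ⟨k1, k2, k4, k5⟩ :=
          hgo (aget r2 p) (vset (dfsGo r1 r2 G (aget r1 p) (vset v (aget r1 p))).2 (aget r2 p))
            (len_mark _ _ g1) hs2ok (by omega)
        have ksub : subv (dfsGo r1 r2 G (aget r1 p) (vset v (aget r1 p))).2 _ :=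
          subv_trans _ _ _ (subv_mark _ _ hs2ok.1) k2
        refine ⟨k1, subv_trans _ _ _ gsub ksub, ?_, ?_⟩
        · have := cnt_mark_le (dfsGo r1 r2 G (aget r1 p) (vset v (aget r1 p))).2 (aget r2 p) hs2ok.1
          omega
        intro hf
        have hs2ne : aget r2 p ≠ 99 :=
          child_ne_99 r1 r2 G (aget r2 p) (dfsGo r1 r2 G (aget r1 p) (vset v (aget r1 p))).2 g1 hGpos hf
        obtain ⟨k99, _, _⟩ := k5 hf
        refine ⟨?_, Or.inr (ksub _ gmark), Or.inr (k2 _ (markD_self _ _ g1 hs2ok))⟩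
        rw [k99, markD_99 _ _ g1 hs2ok hs2ne, g99v]
      · rw [if_neg hC2]
        refine ⟨g1, gsub, gcnt, ?_⟩
        intro _
        refine ⟨g99v, Or.inr gmark, ?_⟩
        by_cases hs2 : aget r2 p = -1
        · exact Or.inl hs2
        · push_neg at hC2
          exact Or.inr (vget_marked _ _ g1 (okp_aget r2 p hr2 hp hs2)
            (by intro h; exact absurd (hC2 hs2) (by rw [h]; simp)))
  · -- first child skipped
    rw [explore_skip1 r1 r2 G p v hC1]
    have hch1 : aget r1 p = -1 ∨ v.getD (aget r1 p).toNat false = true := by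
      by_cases hs1 : aget r1 p = -1
      · exact Or.inl hs1
      · push_neg at hC1
        exact Or.inr (vget_marked _ _ hlen (okp_aget r1 p hr1 hp hs1)
          (by intro h; exact absurd (hC1 hs1) (by rw [h]; simp)))
    by_cases hC2 : aget r2 p ≠ -1 ∧ vget v (aget r2 p) = false
    · have hs2ok : okp (aget r2 p) := okp_aget r2 p hr2 hp hC2.1
      have hcnt2 : (vset v (aget r2 p)).count false + 1 = v.count false :=
        cnt_mark v _ hlen hs2ok hC2.2
      have hGpos : 0 < G := by
        have := cnt_pos v _ hlen hs2ok hC2.2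
        omega
      rw [if_pos hC2]
      obtain ⟨k1, k2, k4, k5⟩ :=
        hgo (aget r2 p) (vset v (aget r2 p)) (len_mark v _ hlen) hs2ok (by omega)
      have ksub : subv v (dfsGo r1 r2 G (aget r2 p) (vset v (aget r2 p))).2 :=
        subv_trans _ _ _ (subv_mark v _ hs2ok.1) k2
      refine ⟨k1, ksub, ?_, ?_⟩
      · have := cnt_mark_le v (aget r2 p) hs2ok.1
        omega
      intro hf
      have hs2ne : aget r2 p ≠ 99 := child_ne_99 r1 r2 G (aget r2 p) v hlen hGpos hf
      obtain ⟨k99, _, _⟩ := k5 hf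
      refine ⟨by rw [k99, markD_99 v _ hlen hs2ok hs2ne], ?_,
        Or.inr (k2 _ (markD_self v _ hlen hs2ok))⟩
      rcases hch1 with h | h
      · exact Or.inl h
      · exact Or.inr (ksub _ h)
    · rw [if_neg hC2]
      refine ⟨hlen, fun n hn => hn, le_refl _, ?_⟩
      intro _
      refine ⟨rfl, hch1, ?_⟩
      by_cases hs2 : aget r2 p = -1
      · exact Or.inl hs2
      · push_neg at hC2
        exact Or.inr (vget_marked _ _ hlen (okp_aget r2 p hr2 hp hs2)
          (by intro h; exact absurd (hC2 hs2) (by rw [h]; simp)))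

lemma go_props (r1 r2 : List Int) (hr1 : WFroute r1) (hr2 : WFroute r2) :
    ∀ (G : Nat) (p : Int) (v : List Bool),
    v.length = 100 → okp p → v.count false < G →
    ResProp r1 r2 p v (dfsGo r1 r2 G p v) := by
  intro G
  induction G with
  | zero =>
    intro p v _ _ hG
    omega
  | succ G ih =>
    intro p v hlen hp hG
    by_cases h99 : vget v 99 = true
    · rw [go_found r1 r2 G p v h99]
      exact ⟨hlen, fun n hn => hn, le_refl _, by intro h; cases h⟩
    · have h99' : vget v 99 = false := by
        cases hx : vget v 99
        · rfl
        · exact absurd hx h99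
      rw [go_unfound r1 r2 G p v h99']
      exact explore_props_aux r1 r2 hr1 hr2 G
        (fun q w hw hq h1 => ih q w hw hq h1) p v hlen hp (by omega)

lemma explore_props (r1 r2 : List Int) (hr1 : WFroute r1) (hr2 : WFroute r2)
    (G : Nat) (p : Int) (v : List Bool)
    (hlen : v.length = 100) (hp : okp p) (hG : v.count false ≤ G) :
    ResProp r1 r2 p v (explore r1 r2 G p v) :=
  explore_props_aux r1 r2 hr1 hr2 G (go_props r1 r2 hr1 hr2 G) p v hlen hp hG

lemma explore_congr_aux (r1 r2 : List Int) (hr1 : WFroute r1) (hr2 : WFroute r2) (G G' : Nat)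
    (hgo : ∀ (q : Int) (w : List Bool), w.length = 100 → okp q →
      w.count false < G → w.count false < G' →
      dfsGo r1 r2 G q w = dfsGo r1 r2 G' q w)
    (p : Int) (v : List Bool) (hlen : v.length = 100) (hp : okp p)
    (hG : v.count false ≤ G) (hG' : v.count false ≤ G') :
    explore r1 r2 G p v = explore r1 r2 G' p v := by
  by_cases hC1 : aget r1 p ≠ -1 ∧ vget v (aget r1 p) = false
  · have hs1ok : okp (aget r1 p) := okp_aget r1 p hr1 hp hC1.1
    have hcnt1 : (vset v (aget r1 p)).count false + 1 = v.count false :=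
      cnt_mark v _ hlen hs1ok hC1.2
    have he1 : dfsGo r1 r2 G (aget r1 p) (vset v (aget r1 p))
        = dfsGo r1 r2 G' (aget r1 p) (vset v (aget r1 p)) :=
      hgo _ _ (len_mark v _ hlen) hs1ok (by omega) (by omega)
    obtain ⟨k1, k2, k4, _⟩ := go_props r1 r2 hr1 hr2 G' (aget r1 p) (vset v (aget r1 p))
      (len_mark v _ hlen) hs1ok (by omega)
    rw [explore_child1 r1 r2 G p v hC1, explore_child1 r1 r2 G' p v hC1, he1]
    by_cases hw1 : (dfsGo r1 r2 G' (aget r1 p) (vset v (aget r1 p))).1 = true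
    · rw [if_pos hw1, if_pos hw1]
    · rw [if_neg hw1, if_neg hw1]
      by_cases hC2 : aget r2 p ≠ -1 ∧ vget (dfsGo r1 r2 G' (aget r1 p) (vset v (aget r1 p))).2 (aget r2 p) = false
      · rw [if_pos hC2, if_pos hC2]
        have hs2ok : okp (aget r2 p) := okp_aget r2 p hr2 hp hC2.1
        have hcnt2 := cnt_mark _ (aget r2 p) k1 hs2ok hC2.2
        have hcle : (vset v (aget r1 p)).count false ≤ v.count false := by omega
        exact hgo _ _ (len_mark _ _ k1) hs2ok (by omega) (by omega)
      · rw [if_neg hC2, if_neg hC2]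
  · have hle : v.count false ≤ G ∧ v.count false ≤ G' := ⟨hG, hG'⟩
    rw [explore_skip1 r1 r2 G p v hC1, explore_skip1 r1 r2 G' p v hC1]
    by_cases hC2 : aget r2 p ≠ -1 ∧ vget v (aget r2 p) = false
    · have hs2ok : okp (aget r2 p) := okp_aget r2 p hr2 hp hC2.1
      have hcnt2 := cnt_mark v (aget r2 p) hlen hs2ok hC2.2
      rw [if_pos hC2, if_pos hC2]
      exact hgo _ _ (len_mark v _ hlen) hs2ok (by omega) (by omega)
    · rw [if_neg hC2, if_neg hC2]

lemma go_congr (r1 r2 : List Int) (hr1 : WFroute r1) (hr2 : WFroute r2) :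
    ∀ (G G' : Nat) (p : Int) (v : List Bool),
    v.length = 100 → okp p → v.count false < G → v.count false < G' →
    dfsGo r1 r2 G p v = dfsGo r1 r2 G' p v := by
  intro G
  induction G with
  | zero =>
    intro G' p v _ _ hG _
    omega
  | succ G ih =>
    intro G' p v hlen hp hG hG'
    cases G' with
    | zero => omega
    | succ G'' =>
      by_cases h99 : vget v 99 = true
      · rw [go_found r1 r2 G p v h99, go_found r1 r2 G'' p v h99]
      · have h99' : vget v 99 = false := by
          cases hx : vget v 99
          · rfl
          · exact absurd hx h99
        rw [go_unfound r1 r2 G p v h99', go_unfound r1 r2 G'' p v h99']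
        exact explore_congr_aux r1 r2 hr1 hr2 G G''
          (fun q w hw hq a b => ih G'' q w hw hq a b)
          p v hlen hp (by omega) (by omega)

lemma explore_congr (r1 r2 : List Int) (hr1 : WFroute r1) (hr2 : WFroute r2)
    (G G' : Nat) (p : Int) (v : List Bool)
    (hlen : v.length = 100) (hp : okp p)
    (hG : v.count false ≤ G) (hG' : v.count false ≤ G') :
    explore r1 r2 G p v = explore r1 r2 G' p v :=
  explore_congr_aux r1 r2 hr1 hr2 G G'
    (fun q w hw hq a b => go_congr r1 r2 hr1 hr2 G G' q w hw hq a b)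
    p v hlen hp hG hG'

lemma loop_found (r1 r2 : List Int) (F : Nat) (p : Int) (stk : List Int) (v : List Bool)
    (h : vget v 99 = true) : dfsLoop r1 r2 (F + 1) p stk v = 1 := by
  simp only [dfsLoop]
  rw [if_pos h]

lemma loop300_found (r1 r2 : List Int) (p : Int) (stk : List Int) (v : List Bool)
    (h : vget v 99 = true) : dfsLoop r1 r2 300 p stk v = 1 := by
  rw [show (300:Nat) = 299 + 1 from rfl]
  exact loop_found r1 r2 299 p stk v h

lemma go100_found (r1 r2 : List Int) (p : Int) (v : List Bool)
    (h : vget v 99 = true) : dfsGo r1 r2 100 p v = (true, v) := by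
  rw [show (100:Nat) = 99 + 1 from rfl]
  exact go_found r1 r2 99 p v h

lemma go100_unfound (r1 r2 : List Int) (p : Int) (v : List Bool)
    (h : vget v 99 = false) : dfsGo r1 r2 100 p v = explore r1 r2 99 p v := by
  rw [show (100:Nat) = 99 + 1 from rfl]
  exact go_unfound r1 r2 99 p v h

lemma loop_eq (r1 r2 : List Int) (hr1 : WFroute r1) (hr2 : WFroute r2) :
    ∀ (F : Nat) (G : Nat) (p : Int) (stk : List Int) (v : List Bool),
    v.length = 100 → okp p → v.getD p.toNat false = true → v.getD 99 false = false →
    (∀ q ∈ stk, okp q ∧ v.getD q.toNat false = true) →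
    2 * v.count false + stk.length + 1 ≤ F → v.count false ≤ G →
    dfsLoop r1 r2 F p stk v = unwind r1 r2 G (explore r1 r2 G p v) stk := by
  intro F
  induction F with
  | zero =>
    intro G p stk v _ _ _ _ _ hF _
    omega
  | succ F ih =>
    intro G p stk v hlen hp hm h99 hstk hF hG
    obtain ⟨hp0, hp1⟩ := hp
    have hp' : okp p := ⟨hp0, hp1⟩
    have h99v : vget v 99 = false := by
      rw [vget_eq v 99 (by omega) (by rw [hlen]; norm_num)]
      norm_num
      exact h99
    simp only [dfsLoop]
    rw [if_neg (by rw [h99v]; simp)]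
    by_cases hC1 : aget r1 p ≠ -1 ∧ vget v (aget r1 p) = false
    · rw [if_pos hC1]
      have hc1ok : okp (aget r1 p) := okp_aget r1 p hr1 hp' hC1.1
      have hcnt1 : (vset v (aget r1 p)).count false + 1 = v.count false :=
        cnt_mark v _ hlen hc1ok hC1.2
      have hcpos : 0 < v.count false := cnt_pos v _ hlen hc1ok hC1.2
      cases G with
      | zero => omega
      | succ G'' =>
      by_cases hc99 : aget r1 p = 99
      · -- child is node 99: both sides return 1
        have hv99 : vget (vset v (aget r1 p)) 99 = true := by
          rw [hc99]; exact vget_mark_99 v hlen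
        have hgo99 : dfsGo r1 r2 (G'' + 1) (aget r1 p) (vset v (aget r1 p)) = (true, vset v (aget r1 p)) :=
          go_found r1 r2 G'' _ _ hv99
        have hex : explore r1 r2 (G'' + 1) p v = (true, vset v (aget r1 p)) := by
          rw [explore_child1 r1 r2 (G'' + 1) p v hC1, hgo99]
          simp
        rw [hex]
        obtain ⟨F'', rfl⟩ : ∃ F'', F = F'' + 1 := ⟨F - 1, by omega⟩
        rw [loop_found r1 r2 F'' _ _ _ hv99]
        simp [unwind]
      · -- descend into the first child
        have hm' : (vset v (aget r1 p)).getD (aget r1 p).toNat false = true :=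
          markD_self v _ hlen hc1ok
        have h99' : (vset v (aget r1 p)).getD 99 false = false := by
          rw [markD_99 v _ hlen hc1ok hc99]
          exact h99
        have hstk' : ∀ q ∈ p :: stk, okp q ∧ (vset v (aget r1 p)).getD q.toNat false = true := by
          intro q hq
          rcases List.mem_cons.mp hq with h | h
          · subst h; exact ⟨hp', subv_mark v _ hc1ok.1 _ hm⟩
          · exact ⟨(hstk q h).1, subv_mark v _ hc1ok.1 _ (hstk q h).2⟩
        have hih := ih (G'' + 1) (aget r1 p) (p :: stk) (vset v (aget r1 p))
          (len_mark v _ hlen) hc1ok hm' h99' hstk'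
          (by simp only [List.length_cons]; omega) (by omega)
        rw [hih]
        have h99m : vget (vset v (aget r1 p)) 99 = false := by
          rw [vget_eq _ 99 (by omega) (by rw [length_vset, hlen]; norm_num)]
          norm_num
          exact h99'
        have hgoc : dfsGo r1 r2 (G'' + 1) (aget r1 p) (vset v (aget r1 p))
            = explore r1 r2 (G'' + 1) (aget r1 p) (vset v (aget r1 p)) := by
          rw [go_unfound r1 r2 G'' _ _ h99m]
          exact explore_congr r1 r2 hr1 hr2 G'' (G'' + 1) _ _
            (len_mark v _ hlen) hc1ok (by omega) (by omega)
        rcases hwe : explore r1 r2 (G'' + 1) (aget r1 p) (vset v (aget r1 p)) with ⟨f, wv⟩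
        obtain ⟨w1, w2, w4, _⟩ := explore_props r1 r2 hr1 hr2 (G'' + 1) (aget r1 p)
          (vset v (aget r1 p)) (len_mark v _ hlen) hc1ok (by omega)
        rw [hwe] at w1 w2 w4
        have hexp : explore r1 r2 (G'' + 1) p v =
            (if f then (true, wv)
             else
               (if aget r2 p ≠ -1 ∧ vget wv (aget r2 p) = false then
                  dfsGo r1 r2 (G'' + 1) (aget r2 p) (vset wv (aget r2 p))
                else (false, wv))) := by
          rw [explore_child1 r1 r2 (G'' + 1) p v hC1, hgoc, hwe]
        cases f with
        | true =>
          rw [hexp]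
          simp [unwind]
        | false =>
          rw [hexp]
          simp only [Bool.false_eq_true, if_false]
          have hmarkc1 : vget wv (aget r1 p) = true := by
            rw [vget_eq wv _ hc1ok.1 (by rw [w1]; obtain ⟨a, b⟩ := hc1ok; push_cast; omega)]
            exact w2 _ hm'
          have hexp2 : explore r1 r2 (G'' + 1) p wv =
              (if aget r2 p ≠ -1 ∧ vget wv (aget r2 p) = false then
                 dfsGo r1 r2 (G'' + 1) (aget r2 p) (vset wv (aget r2 p))
               else (false, wv)) :=
            explore_skip1 r1 r2 (G'' + 1) p wv (by intro h; rw [hmarkc1] at h; simp at h)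
          rw [show unwind r1 r2 (G'' + 1) (false, wv) (p :: stk)
              = unwind r1 r2 (G'' + 1) (explore r1 r2 (G'' + 1) p wv) stk from rfl]
          rw [hexp2]
    · rw [if_neg hC1]
      by_cases hC2 : aget r2 p ≠ -1 ∧ vget v (aget r2 p) = false
      · rw [if_pos hC2]
        have hc2ok : okp (aget r2 p) := okp_aget r2 p hr2 hp' hC2.1
        have hcnt2 : (vset v (aget r2 p)).count false + 1 = v.count false :=
          cnt_mark v _ hlen hc2ok hC2.2
        have hcpos : 0 < v.count false := cnt_pos v _ hlen hc2ok hC2.2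
        cases G with
        | zero => omega
        | succ G'' =>
        by_cases hc99 : aget r2 p = 99
        · have hv99 : vget (vset v (aget r2 p)) 99 = true := by
            rw [hc99]; exact vget_mark_99 v hlen
          have hgo99 : dfsGo r1 r2 (G'' + 1) (aget r2 p) (vset v (aget r2 p)) = (true, vset v (aget r2 p)) :=
            go_found r1 r2 G'' _ _ hv99
          have hex : explore r1 r2 (G'' + 1) p v = (true, vset v (aget r2 p)) := by
            rw [explore_skip1 r1 r2 (G'' + 1) p v hC1, if_pos hC2, hgo99]
          rw [hex]
          obtain ⟨F'', rfl⟩ : ∃ F'', F = F'' + 1 := ⟨F - 1, by omega⟩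
          rw [loop_found r1 r2 F'' _ _ _ hv99]
          simp [unwind]
        · have hm' : (vset v (aget r2 p)).getD (aget r2 p).toNat false = true :=
            markD_self v _ hlen hc2ok
          have h99' : (vset v (aget r2 p)).getD 99 false = false := by
            rw [markD_99 v _ hlen hc2ok hc99]
            exact h99
          have hstk' : ∀ q ∈ p :: stk, okp q ∧ (vset v (aget r2 p)).getD q.toNat false = true := by
            intro q hq
            rcases List.mem_cons.mp hq with h | h
            · subst h; exact ⟨hp', subv_mark v _ hc2ok.1 _ hm⟩
            · exact ⟨(hstk q h).1, subv_mark v _ hc2ok.1 _ (hstk q h).2⟩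
          have hih := ih (G'' + 1) (aget r2 p) (p :: stk) (vset v (aget r2 p))
            (len_mark v _ hlen) hc2ok hm' h99' hstk'
            (by simp only [List.length_cons]; omega) (by omega)
          rw [hih]
          have h99m : vget (vset v (aget r2 p)) 99 = false := by
            rw [vget_eq _ 99 (by omega) (by rw [length_vset, hlen]; norm_num)]
            norm_num
            exact h99'
          have hgoc : dfsGo r1 r2 (G'' + 1) (aget r2 p) (vset v (aget r2 p))
              = explore r1 r2 (G'' + 1) (aget r2 p) (vset v (aget r2 p)) := by
            rw [go_unfound r1 r2 G'' _ _ h99m]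
            exact explore_congr r1 r2 hr1 hr2 G'' (G'' + 1) _ _
              (len_mark v _ hlen) hc2ok (by omega) (by omega)
          rcases hwe : explore r1 r2 (G'' + 1) (aget r2 p) (vset v (aget r2 p)) with ⟨f, wv⟩
          obtain ⟨w1, w2, w4, _⟩ := explore_props r1 r2 hr1 hr2 (G'' + 1) (aget r2 p)
            (vset v (aget r2 p)) (len_mark v _ hlen) hc2ok (by omega)
          rw [hwe] at w1 w2 w4
          have hexp : explore r1 r2 (G'' + 1) p v = (f, wv) := by
            rw [explore_skip1 r1 r2 (G'' + 1) p v hC1, if_pos hC2, hgoc, hwe]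
          rw [hexp]
          cases f with
          | true => simp [unwind]
          | false =>
            have hmarkc2 : vget wv (aget r2 p) = true := by
              rw [vget_eq wv _ hc2ok.1 (by rw [w1]; obtain ⟨a, b⟩ := hc2ok; push_cast; omega)]
              exact w2 _ hm'
            have hskip1 : ¬(aget r1 p ≠ -1 ∧ vget wv (aget r1 p) = false) := by
              intro hcon
              by_cases hs1 : aget r1 p = -1
              · exact hcon.1 hs1
              · have hv1 : vget v (aget r1 p) = true := by
                  push_neg at hC1
                  have := hC1 hs1
                  cases hx : vget v (aget r1 p)
                  · exact absurd hx this
                  · rfl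
                have hok1 : okp (aget r1 p) := okp_aget r1 p hr1 hp' hs1
                have : vget wv (aget r1 p) = true := by
                  rw [vget_eq wv _ hok1.1 (by rw [w1]; obtain ⟨a, b⟩ := hok1; push_cast; omega)]
                  refine w2 _ (subv_mark v _ hc2ok.1 _ ?_)
                  rw [← vget_eq v _ hok1.1 (by rw [hlen]; obtain ⟨a, b⟩ := hok1; push_cast; omega)]
                  exact hv1
                rw [this] at hcon
                simp at hcon
            have hexp2 : explore r1 r2 (G'' + 1) p wv = (false, wv) := by
              rw [explore_skip1 r1 r2 (G'' + 1) p wv hskip1,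
                if_neg (by intro h; rw [hmarkc2] at h; simp at h :
                  ¬(aget r2 p ≠ -1 ∧ vget wv (aget r2 p) = false))]
            rw [show unwind r1 r2 (G'' + 1) (false, wv) (p :: stk)
                = unwind r1 r2 (G'' + 1) (explore r1 r2 (G'' + 1) p wv) stk from rfl]
            rw [hexp2]
      · rw [if_neg hC2]
        have hexp : explore r1 r2 G p v = (false, v) := by
          rw [explore_skip1 r1 r2 G p v hC1, if_neg hC2]
        rw [hexp]
        cases stk with
        | nil => rfl
        | cons q rest =>
          have hq := hstk q (List.mem_cons_self ..)
          have hih := ih G q rest v hlen hq.1 hq.2 h99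
            (fun x hx => hstk x (List.mem_cons_of_mem q hx))
            (by simp only [List.length_cons] at hF; omega) hG
          rw [show unwind r1 r2 G (false, v) (q :: rest)
              = unwind r1 r2 G (explore r1 r2 G q v) rest from rfl]
          exact hih

set_option maxRecDepth 40000 in
lemma init_cnt : List.count false (vset (List.replicate 100 false) 0) = 99 := by decide

set_option maxRecDepth 40000 in
lemma init_99 : (vset (List.replicate 100 false) 0).getD 99 false = false := by decide

lemma init_len : (vset (List.replicate 100 false) 0).length = 100 := by
  rw [length_vset]
  simp

lemma start_spec (r1 : List Int) (hl1 : 0 < r1.length) :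
    PySem.List.pyGet? r1 0 = some (aget r1 0) := by
  have h0 : PySem.List.pyGet? r1 ((0:Nat):Int) = r1[(0:Nat)]? := PySem.List.pyGet?_natCast r1 0
  have h1 : r1[(0:Nat)]? = some (r1[0]'hl1) := List.getElem?_eq_getElem hl1
  have h2 : aget r1 0 = r1[(0:Int).toNat]'(by omega) :=
    PySem.List.pyGetD_eq_getElem r1 0 (by omega) (by push_cast; omega)
  rw [show ((0:Nat):Int) = (0:Int) by norm_num] at h0
  rw [h0, h1, h2]
  norm_num

lemma skip_of_post (r : List Int) (p : Int) (wv : List Bool) (hr : WFroute r)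
    (hw : wv.length = 100) (hp : okp p)
    (hch : aget r p = -1 ∨ wv.getD (aget r p).toNat false = true) :
    ¬(aget r p ≠ -1 ∧ vget wv (aget r p) = false) := by
  intro h
  rcases hch with h1 | h1
  · exact h.1 h1
  · have hok : okp (aget r p) := okp_aget r p hr hp h.1
    have : vget wv (aget r p) = true := by
      rw [vget_eq wv _ hok.1 (by rw [hw]; obtain ⟨a, b⟩ := hok; push_cast; omega)]
      exact h1
    rw [this] at h
    simp at h

-- ===== VERDICT (by name: the statement is the Claim_ definition above) =====
set_option maxRecDepth 40000 in
theorem dfs_spec : Claim_equal_dfs := by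
  intro r1 r2 hdom hpre
  show dfs r1 r2 = dfs_alt r1 r2
  have hne : 0 < r1.length := by
    rcases hpre with (h | h) | h
    · rcases h1 : PySem.List.pyGet? r1 0 with _ | x
      · rw [h1] at h; cases h
      · cases r1 with
        | nil => simp [PySem.List.pyGet?] at h1
        | cons a l => simp
    · rcases h1 : PySem.List.pyGet? r1 0 with _ | x
      · rw [h1] at h; cases h
      · cases r1 with
        | nil => simp [PySem.List.pyGet?] at h1
        | cons a l => simp
    · rw [h.1]; norm_num
  have hget := start_spec r1 hne
  simp only [dfs, dfs_alt]
  by_cases hq : aget r1 0 = -1 ∨ aget r1 0 = 99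
  · -- quick region: visited[99] is set by the pre-marking, both return 1 at once
    have hv99 : vget (vset (vset (List.replicate 100 false) 0) (aget r1 0)) 99 = true := by
      rcases hq with h | h
      · rw [h]; decide
      · rw [h]; decide
    rw [loop300_found r1 r2 _ _ _ hv99, go100_found r1 r2 _ _ hv99]
    rfl
  · push_neg at hq
    obtain ⟨hsne, hs99⟩ := hq
    have hcontest : r1.length = 100 ∧ r2.length = 100 ∧
        (∀ x ∈ r1, -1 ≤ x ∧ x ≤ 99) ∧ (∀ x ∈ r2, -1 ≤ x ∧ x ≤ 99) := by
      rcases hpre with (h | h) | h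
      · rw [hget] at h
        exact absurd (Option.some.inj h) hsne
      · rw [hget] at h
        exact absurd (Option.some.inj h) hs99
      · exact h
    obtain ⟨hl1, hl2, hb1, hb2⟩ := hcontest
    have hr1 : WFroute r1 := ⟨hl1, hb1⟩
    have hr2 : WFroute r2 := ⟨hl2, hb2⟩
    have hs_ok : okp (aget r1 0) := by
      have hmem : aget r1 0 ∈ r1 :=
        PySem.List.pyGetD_mem r1 0 (by constructor <;> (rw [hl1]; norm_num))
      have := hb1 _ hmem
      exact ⟨by omega, this.2⟩
    have hv2len : (vset (vset (List.replicate 100 false) 0) (aget r1 0)).length = 100 := by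
      rw [length_vset]; exact init_len
    have hm : (vset (vset (List.replicate 100 false) 0) (aget r1 0)).getD (aget r1 0).toNat false = true :=
      markD_self _ _ init_len hs_ok
    have h99' : (vset (vset (List.replicate 100 false) 0) (aget r1 0)).getD 99 false = false := by
      rw [markD_99 _ _ init_len hs_ok hs99]
      exact init_99
    have hcnt : (vset (vset (List.replicate 100 false) 0) (aget r1 0)).count false ≤ 99 := by
      have := cnt_mark_le (vset (List.replicate 100 false) 0) (aget r1 0) hs_ok.1
      rw [init_cnt] at this
      exact this
    have hle := loop_eq r1 r2 hr1 hr2 300 99 (aget r1 0) [aget r1 0]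
      (vset (vset (List.replicate 100 false) 0) (aget r1 0))
      hv2len hs_ok hm h99'
      (by
        intro q hq'
        have : q = aget r1 0 := by simpa using hq'
        subst this
        exact ⟨hs_ok, hm⟩)
      (by simp only [List.length_cons, List.length_nil]; omega) hcnt
    rw [hle]
    have h99v : vget (vset (vset (List.replicate 100 false) 0) (aget r1 0)) 99 = false := by
      rw [vget_eq _ 99 (by omega) (by rw [hv2len]; norm_num)]
      norm_num
      exact h99'
    rw [go100_unfound r1 r2 _ _ h99v]
    rcases hwe : explore r1 r2 99 (aget r1 0) (vset (vset (List.replicate 100 false) 0) (aget r1 0)) with ⟨f, wv⟩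
    obtain ⟨w1, w2, w4, w5⟩ := explore_props r1 r2 hr1 hr2 99 (aget r1 0)
      (vset (vset (List.replicate 100 false) 0) (aget r1 0)) hv2len hs_ok hcnt
    rw [hwe] at w1 w2 w4 w5
    cases f with
    | true => rfl
    | false =>
      obtain ⟨_, ch1, ch2⟩ := w5 rfl
      have hskip1 := skip_of_post r1 (aget r1 0) wv hr1 w1 hs_ok ch1
      have hskip2 := skip_of_post r2 (aget r1 0) wv hr2 w1 hs_ok ch2
      have hexp2 : explore r1 r2 99 (aget r1 0) wv = (false, wv) := by
        rw [explore_skip1 r1 r2 99 (aget r1 0) wv hskip1, if_neg hskip2]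
      rw [show unwind r1 r2 99 (false, wv) [aget r1 0]
          = unwind r1 r2 99 (explore r1 r2 99 (aget r1 0) wv) [] from rfl]
      rw [hexp2]
      rfl
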